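-- pv_equiv track=rewrite | github.com/ACEnglish/kanpig | experiments/cnthom.py | cnthom
-- ===== SOURCE A (Python) =====
-- def cnthom(seq):
--     maxspan = 5
--     count = 0
--     prev = None
--     removed = 0
--     for i in seq:
--         if i == prev:
--             count += 1
--             if count >= maxspan:
--                 removed += 1
--         else:
--             count = 1
--         prev = i
--     return removed
-- ===== SOURCE B (Python) =====
-- def cnthom(seq):
--     total = 0
--     i, n = 0, len(seq)
--     while i < n:
--         c = seq[i]
--         j = i + 1
--         while j < n and seq[j] == c:
--             j += 1
--         total += max(0, (j - i) - 4)
--         i = j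
--     return total
-- ===== Notes on version B (the rewrite author's own statement) =====
-- stated objective: alternative
-- what changed: Replaces the per-element prev/count/removed state machine with a two-pointer scan that finds each maximal homopolymer run and adds max(0, L-4) per run.
import Mathlib
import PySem

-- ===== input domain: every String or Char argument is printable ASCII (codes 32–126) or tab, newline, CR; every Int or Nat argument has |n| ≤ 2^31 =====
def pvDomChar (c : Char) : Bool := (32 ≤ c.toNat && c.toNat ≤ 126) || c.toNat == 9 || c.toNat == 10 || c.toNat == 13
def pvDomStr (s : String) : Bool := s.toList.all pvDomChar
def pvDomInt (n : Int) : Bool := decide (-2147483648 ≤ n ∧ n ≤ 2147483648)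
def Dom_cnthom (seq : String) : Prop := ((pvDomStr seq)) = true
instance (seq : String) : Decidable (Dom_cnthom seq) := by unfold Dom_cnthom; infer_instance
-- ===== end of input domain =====

-- B replaces A's per-element prev/count/removed state machine with a run-splitting scan
-- that peels one maximal homopolymer run at a time and adds max(0, L-4) per run (objective: alternative).

-- ===== PORT A =====
-- one step of A's for-loop: state = (count, prev, removed)
def cnthomStep (s : Int × Option Char × Int) (i : Char) : Int × Option Char × Int :=
  match s with
  | (count, prev, removed) =>
    if some i = prev then
      let count := count + 1
      let removed := if 5 ≤ count then removed + 1 else removed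
      (count, some i, removed)
    else
      (1, some i, removed)

def cnthom (seq : String) : Int :=
  (seq.toList.foldl cnthomStep (0, none, 0)).2.2

-- ===== PORT B =====
-- Source B's inner while loop: split off the leading run of c, returning (its length, the rest)
def runSplit (c : Char) : List Char → Nat × List Char
  | [] => (0, [])
  | x :: xs => if x = c then ((runSplit c xs).1 + 1, (runSplit c xs).2) else (0, x :: xs)

-- needed by altGo's termination
theorem runSplit_length_le (c : Char) (l : List Char) : (runSplit c l).2.length ≤ l.length := by
  induction l with
  | nil => simp [runSplit]
  | cons x xs ih =>
    simp only [runSplit]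
    split
    · exact Nat.le_succ_of_le ih
    · simp

-- Source B's outer while loop over the remaining list
def altGo : List Char → Int → Int
  | [], total => total
  | x :: xs, total =>
      altGo (runSplit x xs).2 (total + max 0 (((runSplit x xs).1 : Int) + 1 - 4))
  termination_by l _ => l.length
  decreasing_by
    have := runSplit_length_le x xs
    simp only [List.length_cons]
    omega

def cnthom_alt (seq : String) : Int :=
  altGo seq.toList 0

-- ===== PRECONDITION & SPEC =====
def Spec_cnthom (seq : String) (out : Int) : Prop := out = cnthom_alt seq
instance (seq : String) (out : Int) : Decidable (Spec_cnthom seq out) := by unfold Spec_cnthom; infer_instance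

-- ===== CLAIM (what is proved, stated in full; the proofs are below) =====
def Claim_equal_cnthom : Prop := ∀ (seq : String), Dom_cnthom seq → Spec_cnthom seq (cnthom seq)

-- ===== LEMMAS AND PROOFS =====

theorem runSplit_head (c : Char) (l : List Char) :
    ∀ x t, (runSplit c l).2 = x :: t → x ≠ c := by
  induction l with
  | nil => intro x t h; simp [runSplit] at h
  | cons y ys ih =>
    intro x t h
    by_cases hy : y = c
    · simp only [runSplit, if_pos hy] at h
      exact ih x t h
    · simp only [runSplit, if_neg hy] at h
      obtain ⟨rfl, -⟩ := h
      exact hy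

-- A's loop consumes the leading run of its current prev, adding the right penalty
theorem foldl_run (l : List Char) (c : Char) :
    ∀ (k r : Int),
      List.foldl cnthomStep (k, some c, r) l
        = List.foldl cnthomStep
            (k + ((runSplit c l).1 : Int), some c,
             r + max 0 (min ((runSplit c l).1 : Int) (k + ((runSplit c l).1 : Int) - 4)))
            (runSplit c l).2 := by
  induction l with
  | nil =>
    intro k r
    simp only [runSplit, List.foldl_nil]
    congr 2 <;> push_cast <;> omega
  | cons x xs ih =>
    intro k r
    by_cases hx : x = c
    · subst hx
      have hstep : cnthomStep (k, some x, r) x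
          = (k + 1, some x, r + (if 5 ≤ k + 1 then 1 else 0)) := by
        simp only [cnthomStep]
        split
        · split_ifs <;> simp
        · simp_all
      rw [List.foldl_cons, hstep, ih (k + 1) (r + (if 5 ≤ k + 1 then 1 else 0))]
      have hrs : runSplit x (x :: xs) = ((runSplit x xs).1 + 1, (runSplit x xs).2) := by
        simp [runSplit]
      rw [hrs]
      have hst2 : ((k + 1 + (((runSplit x xs).1 : Nat) : Int), some x,
          r + (if 5 ≤ k + 1 then (1:Int) else 0)
            + max 0 (min (((runSplit x xs).1 : Nat) : Int) (k + 1 + (((runSplit x xs).1 : Nat) : Int) - 4))) : Int × Option Char × Int)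
          = (k + ((((runSplit x xs).1 + 1 : Nat)) : Int), some x,
             r + max 0 (min ((((runSplit x xs).1 + 1 : Nat)) : Int) (k + ((((runSplit x xs).1 + 1 : Nat)) : Int) - 4))) := by
        simp only [Prod.mk.injEq]
        refine ⟨by push_cast; omega, trivial, by push_cast; split_ifs <;> omega⟩
      rw [hst2]
    · have hrs : runSplit c (x :: xs) = (0, x :: xs) := by
        simp [runSplit, hx]
      rw [hrs]
      have hst : ((k + ((0 : Nat) : Int), some c,
          r + max 0 (min ((0 : Nat) : Int) (k + ((0 : Nat) : Int) - 4))) : Int × Option Char × Int)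
          = (k, some c, r) := by
        congr 2 <;> push_cast <;> omega
      rw [hst]

-- A's loop from a state whose prev does not match the head computes B's run sum
theorem go_eq (n : Nat) : ∀ (l : List Char), l.length ≤ n →
    ∀ (p : Option Char) (k r : Int), (∀ x t, l = x :: t → p ≠ some x) →
      (List.foldl cnthomStep (k, p, r) l).2.2 = altGo l r := by
  induction n with
  | zero =>
    intro l hl p k r _
    interval_cases hlen : l.length
    rw [List.length_eq_zero_iff] at hlen
    subst hlen
    simp [altGo]
  | succ n ih =>
    intro l hl p k r hp
    cases l with
    | nil => simp [altGo]
    | cons x xs =>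
      have hstep : cnthomStep (k, p, r) x = (1, some x, r) := by
        simp only [cnthomStep]
        rw [if_neg (fun h => hp x xs rfl h.symm)]
      rw [List.foldl_cons, hstep, foldl_run xs x 1 r]
      have hlen : (runSplit x xs).2.length ≤ n := by
        have := runSplit_length_le x xs
        simp only [List.length_cons] at hl
        omega
      have hhead : ∀ y t, (runSplit x xs).2 = y :: t → (some x : Option Char) ≠ some y := by
        intro y t h hxy
        exact runSplit_head x xs y t h (by simpa using hxy.symm)
      rw [ih (runSplit x xs).2 hlen (some x) _ _ hhead]
      show altGo _ _ = altGo (x :: xs) r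
      rw [altGo]
      congr 1
      have h0 : (0 : Int) ≤ ((runSplit x xs).1 : Int) := Int.natCast_nonneg _
      omega

-- ===== VERDICT (by name: the statement is the Claim_ definition above) =====
theorem cnthom_spec : Claim_equal_cnthom := by
  intro seq _
  show cnthom seq = cnthom_alt seq
  unfold cnthom cnthom_alt
  exact go_eq seq.toList.length seq.toList le_rfl none 0 0 (by intro x t _ h; cases h)
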